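-- pv_equiv track=rewrite | github.com/lam-np/Python_FPTU | 33dxNum.py | lasoDX
-- ===== SOURCE A (Python) =====
-- def lasoDX(numbers):
--     for num in numbers:
--         if num<0:
--             return False
--         so_daonguoc=0
--         temp=num
--         while temp!=0:
--             chuso=temp%10
--             so_daonguoc=so_daonguoc*10+chuso
--             temp//=10
--         if num!=so_daonguoc:
--             return False
--     return True
-- ===== SOURCE B (Python) =====
-- def lasoDX(numbers):
--     def digits_of(n):
--         # LSB-first digit list of a non-negative integer (empty for 0)
--         if n > 0:
--             return [n % 10] + digits_of(n // 10)
--         return []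
--
--     def is_pal(ds):
--         i, j = 0, len(ds) - 1
--         while i < j:
--             if ds[i] != ds[j]:
--                 return False
--             i += 1
--             j -= 1
--         return True
--
--     return all(num >= 0 and is_pal(digits_of(num)) for num in numbers)
-- ===== Notes on version B (the rewrite author's own statement) =====
-- stated objective: alternative
-- what changed: B replaces A's arithmetic reconstruction of the reversed integer by extracting the digit list recursively and testing palindromicity with a two-pointer scan from both ends, with the per-number test folded into a short-circuiting all().
import Mathlib
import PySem

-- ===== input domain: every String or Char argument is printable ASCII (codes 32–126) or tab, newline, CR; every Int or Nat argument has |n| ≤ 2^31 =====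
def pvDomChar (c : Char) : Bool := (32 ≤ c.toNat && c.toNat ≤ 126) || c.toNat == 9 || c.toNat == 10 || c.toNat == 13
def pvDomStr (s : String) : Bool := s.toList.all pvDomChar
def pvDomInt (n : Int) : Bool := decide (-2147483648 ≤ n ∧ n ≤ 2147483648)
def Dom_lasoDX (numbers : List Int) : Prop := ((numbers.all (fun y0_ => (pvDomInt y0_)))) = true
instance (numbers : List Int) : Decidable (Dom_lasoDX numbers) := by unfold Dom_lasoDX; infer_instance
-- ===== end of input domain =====

-- B replaces A's arithmetic reconstruction of the reversed integer by a recursively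
-- extracted digit list tested with a two-pointer scan (alternative, same cost).

-- termination measure lemma for the digit loops of both ports
theorem pvFd10_toNat_lt (temp : Int) (h : 0 < temp) :
    (PySem.Int.floordiv temp 10).toNat < temp.toNat := by
  have h1 : PySem.Int.floordiv temp 10 < temp :=
    (PySem.Int.floordiv_lt_iff_lt_mul (by omega)).mpr (by nlinarith)
  have h2 : 0 ≤ PySem.Int.floordiv temp 10 := by
    rw [PySem.Int.floordiv_eq_ediv_of_pos (by omega)]
    exact Int.ediv_nonneg (le_of_lt h) (by omega)
  omega

-- ===== PORT A =====
-- A's inner `while temp != 0` loop; the loop is only ever entered with temp ≥ 0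
-- (num < 0 has already returned False), where `temp != 0` is exactly `0 < temp`.
def lasoRev (temp so_daonguoc : Int) : Int :=
  if h : 0 < temp then
    lasoRev (PySem.Int.floordiv temp 10) (so_daonguoc * 10 + PySem.Int.mod temp 10)
  else so_daonguoc
termination_by temp.toNat
decreasing_by exact pvFd10_toNat_lt temp h

def lasoDX : List Int → Bool
  | [] => true
  | num :: rest =>
    if num < 0 then false
    else if num ≠ lasoRev num 0 then false
    else lasoDX rest

-- ===== PORT B =====
-- Source B's digits_of: recursion, only called with n ≥ 0 where `n > 0` guards it.
def pvDigits (n : Int) : List Int :=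
  if h : 0 < n then PySem.Int.mod n 10 :: pvDigits (PySem.Int.floordiv n 10) else []
termination_by n.toNat
decreasing_by exact pvFd10_toNat_lt n h

-- Source B's is_pal two-pointer loop; the accesses ds[i], ds[j] are always in range
-- (0 ≤ i < j ≤ len ds - 1), where Python's ds[k] is exactly ds.getD k 0.
def pvPalLoop (ds : List Int) (i j : Nat) : Bool :=
  if i < j then
    if ds.getD i 0 ≠ ds.getD j 0 then false
    else pvPalLoop ds (i + 1) (j - 1)
  else true
termination_by j - i

def lasoDX_alt (numbers : List Int) : Bool :=
  numbers.all fun num =>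
    decide (0 ≤ num) && pvPalLoop (pvDigits num) 0 ((pvDigits num).length - 1)

-- ===== PRECONDITION & SPEC =====
def Spec_lasoDX (numbers : List Int) (out : Bool) : Prop := out = lasoDX_alt numbers
instance (numbers : List Int) (out : Bool) : Decidable (Spec_lasoDX numbers out) := by unfold Spec_lasoDX; infer_instance

-- ===== CLAIM (what is proved, stated in full; the proofs are below) =====
def Claim_equal_lasoDX : Prop := ∀ (numbers : List Int), Dom_lasoDX numbers → Spec_lasoDX numbers (lasoDX numbers)

-- ===== LEMMAS AND PROOFS =====

-- value of an LSB-first digit list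
def pvVal : List Int → Int
  | [] => 0
  | d :: ds => d + 10 * pvVal ds

theorem pvVal_digits (n : Int) (h0 : 0 ≤ n) : pvVal (pvDigits n) = n := by
  by_cases h : 0 < n
  · have hnn : 0 ≤ PySem.Int.floordiv n 10 := by
      rw [PySem.Int.floordiv_eq_ediv_of_pos (by omega)]
      exact Int.ediv_nonneg h0 (by omega)
    have hrec := pvVal_digits (PySem.Int.floordiv n 10) hnn
    have hm : PySem.Int.mod n 10 = n % 10 := PySem.Int.mod_eq_emod_of_pos (by omega)
    have hf : PySem.Int.floordiv n 10 = n / 10 := PySem.Int.floordiv_eq_ediv_of_pos (by omega)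
    rw [pvDigits, dif_pos h]
    rw [hf] at hrec
    simp only [pvVal, hm, hf, hrec]
    omega
  · have : n = 0 := by omega
    subst this
    rw [pvDigits, dif_neg h]; rfl
termination_by n.toNat
decreasing_by exact pvFd10_toNat_lt n h

theorem lasoRev_foldl (temp acc : Int) :
    lasoRev temp acc = List.foldl (fun a d => a * 10 + d) acc (pvDigits temp) := by
  by_cases h : 0 < temp
  · have hstep : pvDigits temp = PySem.Int.mod temp 10 :: pvDigits (PySem.Int.floordiv temp 10) := by
      conv_lhs => rw [pvDigits]
      rw [dif_pos h]
    rw [lasoRev, dif_pos h, hstep, List.foldl_cons,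
      lasoRev_foldl (PySem.Int.floordiv temp 10) (acc * 10 + PySem.Int.mod temp 10)]
  · rw [lasoRev, dif_neg h, pvDigits, dif_neg h]; rfl
termination_by temp.toNat
decreasing_by exact pvFd10_toNat_lt temp h

theorem pvVal_append_singleton (l : List Int) (d : Int) :
    pvVal (l ++ [d]) = pvVal l + 10 ^ l.length * d := by
  induction l with
  | nil => simp [pvVal]
  | cons x l ih => simp [pvVal, ih]; ring

theorem foldl_val (ds : List Int) (acc : Int) :
    List.foldl (fun a d => a * 10 + d) acc ds = acc * 10 ^ ds.length + pvVal ds.reverse := by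
  induction ds generalizing acc with
  | nil => simp [pvVal]
  | cons d ds ih =>
    simp [List.foldl, ih, pvVal_append_singleton]
    ring

theorem digits_bounds (n : Int) : ∀ d ∈ pvDigits n, 0 ≤ d ∧ d < 10 := by
  by_cases h : 0 < n
  · rw [pvDigits, dif_pos h]
    intro d hd
    rcases List.mem_cons.mp hd with h1 | h2
    · subst h1
      have : PySem.Int.mod n 10 = n % 10 := PySem.Int.mod_eq_emod_of_pos (by omega)
      rw [this]
      exact ⟨Int.emod_nonneg n (by omega), Int.emod_lt_of_pos n (by omega)⟩
    · exact digits_bounds (PySem.Int.floordiv n 10) d h2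
  · rw [pvDigits, dif_neg h]; simp
termination_by n.toNat
decreasing_by exact pvFd10_toNat_lt n h

theorem pvVal_nonneg (ds : List Int) (h : ∀ d ∈ ds, 0 ≤ d ∧ d < 10) : 0 ≤ pvVal ds := by
  induction ds with
  | nil => simp [pvVal]
  | cons d ds ih =>
    have := h d (by simp)
    have := ih (fun x hx => h x (by simp [hx]))
    simp [pvVal]; omega

theorem pvVal_inj (ds : List Int) : ∀ (es : List Int), ds.length = es.length →
    (∀ d ∈ ds, 0 ≤ d ∧ d < 10) → (∀ d ∈ es, 0 ≤ d ∧ d < 10) →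
    pvVal ds = pvVal es → ds = es := by
  induction ds with
  | nil => intro es hl _ _ _; exact (List.length_eq_zero_iff.mp hl.symm).symm
  | cons d ds ih =>
    intro es hl hb1 hb2 hv
    cases es with
    | nil => simp at hl
    | cons e es =>
      have hd := hb1 d (by simp)
      have he := hb2 e (by simp)
      have hds : ∀ x ∈ ds, 0 ≤ x ∧ x < 10 := fun x hx => hb1 x (by simp [hx])
      have hes : ∀ x ∈ es, 0 ≤ x ∧ x < 10 := fun x hx => hb2 x (by simp [hx])
      have h1 := pvVal_nonneg ds hds
      have h2 := pvVal_nonneg es hes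
      simp [pvVal] at hv
      have hde : d = e ∧ pvVal ds = pvVal es := by omega
      simp at hl
      exact by rw [hde.1, ih es hl hds hes hde.2]

-- characterisation of the two-pointer loop
theorem pvPalLoop_iff (ds : List Int) (i j : Nat) :
    pvPalLoop ds i j = true ↔
      ∀ k, i ≤ k → k ≤ j → ds.getD k 0 = ds.getD (i + j - k) 0 := by
  by_cases h : i < j
  · rw [pvPalLoop, if_pos h]
    by_cases he : ds.getD i 0 = ds.getD j 0
    · rw [if_neg (not_not_intro he), pvPalLoop_iff ds (i + 1) (j - 1)]
      constructor
      · intro hrec k hik hkj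
        by_cases hk1 : k = i
        · subst hk1; simpa using he
        · by_cases hk2 : k = j
          · have hj : i + j - k = i := by omega
            rw [hj, hk2]; exact he.symm
          · have h1 : i + 1 ≤ k := by omega
            have h2 : k ≤ j - 1 := by omega
            have := hrec k h1 h2
            have he2 : i + 1 + (j - 1) - k = i + j - k := by omega
            rwa [he2] at this
      · intro hall k hik hkj
        have := hall k (by omega) (by omega)
        have he2 : i + 1 + (j - 1) - k = i + j - k := by omega
        rwa [he2]
    · rw [if_pos he]
      simp only [Bool.false_eq_true, false_iff]
      intro hall
      exact he (by simpa using hall i le_rfl (le_of_lt h))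
  · rw [pvPalLoop, if_neg h]
    simp only [true_iff]
    intro k hik hkj
    rw [show i + j - k = k from by omega]
termination_by j - i

theorem reverse_eq_iff_getD (ds : List Int) :
    ds = ds.reverse ↔ ∀ k, k ≤ ds.length - 1 → ds.getD k 0 = ds.getD (ds.length - 1 - k) 0 := by
  rcases List.eq_nil_or_concat ds with hnil | ⟨_, _, _⟩
  · subst hnil; simp
  · have hne : ds ≠ [] := by rintro rfl; simp_all
    have hlen : 0 < ds.length := List.length_pos_iff.mpr hne
    constructor
    · intro hrev k hk
      have hk' : k < ds.length := by omega
      have h1 : ds.getD k 0 = ds.reverse.getD k 0 := by rw [← hrev]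
      rw [h1, List.getD_eq_getElem ds.reverse 0 (by simpa using hk'), List.getElem_reverse,
        List.getD_eq_getElem ds 0 (by omega)]
    · intro hall
      apply List.ext_getElem (by simp)
      intro k hk hk2
      rw [List.getElem_reverse]
      have h1 := hall k (by omega)
      rw [List.getD_eq_getElem ds 0 hk, List.getD_eq_getElem ds 0 (by omega : ds.length - 1 - k < ds.length)] at h1
      exact h1

-- per-number equivalence of the two palindrome tests
theorem palin_iff (num : Int) (h0 : 0 ≤ num) :
    (num = lasoRev num 0) ↔ pvPalLoop (pvDigits num) 0 ((pvDigits num).length - 1) = true := by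
  set ds := pvDigits num with hds
  have hb : ∀ d ∈ ds, 0 ≤ d ∧ d < 10 := digits_bounds num
  have hrev : lasoRev num 0 = pvVal ds.reverse := by
    rw [lasoRev_foldl, foldl_val]; ring
  have hval := pvVal_digits num h0
  rw [pvPalLoop_iff]
  have hmain : (num = lasoRev num 0) ↔ ds = ds.reverse := by
    constructor
    · intro h
      refine pvVal_inj _ _ (by simp) hb (fun d hd => hb d (List.mem_reverse.mp hd)) ?_
      rw [hval]; exact h.trans hrev
    · intro h
      rw [hrev, ← h, hval]
  rw [hmain, reverse_eq_iff_getD]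
  constructor
  · intro h k _ hk
    have := h k hk
    simpa using this
  · intro h k hk
    have := h k (Nat.zero_le k) hk
    simpa using this

theorem lasoDX_eq (numbers : List Int) : lasoDX numbers = lasoDX_alt numbers := by
  induction numbers with
  | nil => rfl
  | cons num rest ih =>
    rw [lasoDX, lasoDX_alt, List.all_cons]
    by_cases hneg : num < 0
    · simp [hneg]
    · have hiff := palin_iff num (by omega)
      rw [if_neg hneg]
      by_cases hp : num = lasoRev num 0
      · rw [if_neg (not_not_intro hp), ih, lasoDX_alt]
        have : (decide (0 ≤ num) && pvPalLoop (pvDigits num) 0 ((pvDigits num).length - 1)) = true := by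
          simp [hiff.mp hp]; omega
        rw [this, Bool.true_and]
      · rw [if_pos hp]
        have hfalse : pvPalLoop (pvDigits num) 0 ((pvDigits num).length - 1) = false := by
          cases hpv : pvPalLoop (pvDigits num) 0 ((pvDigits num).length - 1)
          · rfl
          · exact absurd (hiff.mpr hpv) hp
        simp [hfalse]

-- ===== VERDICT (by name: the statement is the Claim_ definition above) =====
theorem lasoDX_spec : Claim_equal_lasoDX := by
  intro numbers _
  show lasoDX numbers = lasoDX_alt numbers
  exact lasoDX_eq numbers
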